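-- pv_equiv track=rewrite | github.com/need-singularity/nexus6 | shared/calc/hexa_alien_evolution_topology.py | build_cech_nerve
-- ===== SOURCE A (Python) =====
-- from itertools import combinations
-- from collections import defaultdict
--
-- SOPFR = 5       # sopfr(6) = sum of prime factors (2+3)
--
-- def build_cech_nerve(modules, dependencies):
--     """Build the Cech nerve of a module dependency covering.
--
--     Each module defines an 'open set' = the module + its direct deps.
--     The nerve is the simplicial complex of intersections.
--
--     Returns simplices up to dimension sopfr=5.
--     """
--     # Open sets: each module's "neighborhood" = itself + deps
--     open_sets = {}
--     for mod in modules: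
--         neighborhood = {mod}
--         for dep in dependencies.get(mod, []):
--             neighborhood.add(dep)
--         open_sets[mod] = neighborhood
--
--     # Build nerve: k-simplices = (k+1) modules with non-empty intersection
--     nerve = defaultdict(list)
--
--     # 0-simplices (vertices) = modules
--     for mod in modules:
--         nerve[0].append((mod,))
--
--     # k-simplices for k = 1 to sopfr=5
--     for k in range(1, SOPFR + 1):
--         for combo in combinations(modules, k + 1):
--             intersection = set.intersection(*(open_sets[m] for m in combo))
--             if intersection:
--                 nerve[k].append(combo)
--
--     return nerve, open_sets
-- ===== SOURCE B (Python) =====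
-- def build_cech_nerve(modules, dependencies):
--     """Same nerve via a pruned DFS over index-ordered combinations:
--     prefix intersections are computed incrementally and empty branches are
--     cut, instead of re-intersecting every combination from scratch."""
--     open_sets = {}
--     for m in modules:
--         nb = {m}
--         nb.update(dependencies.get(m, []))
--         open_sets[m] = nb
--
--     nerve = {}
--     if modules:
--         nerve[0] = [(m,) for m in modules]
--     for k in range(1, 6):
--         simps = _top(k + 1, modules, open_sets)
--         if simps:
--             nerve[k] = simps
--     return nerve, open_sets
--
--
-- def _top(size, mods, open_sets):
--     # all (size)-tuples in combinations order whose open sets intersect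
--     out = []
--     for i, m in enumerate(mods):
--         for t in _rec(size - 1, mods[i + 1:], open_sets[m], open_sets):
--             out.append((m,) + t)
--     return out
--
--
-- def _rec(r, mods, inter, open_sets):
--     # extend a prefix with nonempty intersection `inter` by r more modules,
--     # pruning as soon as the running intersection becomes empty
--     if r == 0:
--         return [()]
--     out = []
--     for i, m in enumerate(mods):
--         i2 = inter & open_sets[m]
--         if i2:
--             for t in _rec(r - 1, mods[i + 1:], i2, open_sets):
--                 out.append((m,) + t)
--     return out
-- ===== Notes on version B (the rewrite author's own statement) =====
-- stated objective: faster
-- what changed: Instead of testing every k+1-subset of modules by intersecting all its open sets from scratch, B enumerates combinations by a DFS that carries the running prefix intersection incrementally and prunes a whole branch as soon as the intersection becomes empty.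
import Mathlib
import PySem

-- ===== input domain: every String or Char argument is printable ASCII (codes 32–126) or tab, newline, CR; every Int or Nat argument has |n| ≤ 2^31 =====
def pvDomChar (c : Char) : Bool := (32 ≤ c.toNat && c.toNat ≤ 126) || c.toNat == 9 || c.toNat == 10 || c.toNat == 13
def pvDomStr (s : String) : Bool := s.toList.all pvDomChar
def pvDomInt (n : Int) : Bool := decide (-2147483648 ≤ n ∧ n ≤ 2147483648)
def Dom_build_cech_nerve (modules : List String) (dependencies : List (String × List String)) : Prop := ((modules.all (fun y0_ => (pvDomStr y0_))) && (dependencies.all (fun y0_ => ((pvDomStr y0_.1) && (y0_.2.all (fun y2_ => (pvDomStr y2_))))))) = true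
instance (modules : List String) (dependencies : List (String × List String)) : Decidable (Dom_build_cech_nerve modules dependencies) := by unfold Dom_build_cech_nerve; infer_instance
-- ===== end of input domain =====

-- B replaces A's from-scratch intersection of every (k+1)-combination by a pruned DFS carrying
-- the running prefix intersection; objective: faster (measured).

-- ===== PORT A =====
-- intersection = set.intersection(*(open_sets[m] for m in combo)); combo is never empty here
def pvInterA (S : PySem.Dict String (PySem.Set String)) (combo : List String) : PySem.Set String :=
  match combo with
  | [] => PySem.Set.empty
  | c0 :: cs => cs.foldl (fun a m => PySem.Set.inter a (S.getD m [])) (S.getD c0 [])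

def build_cech_nerve (modules : List String) (dependencies : List (String × List String)) : (List (Int × List (List String))) × (List (String × List String)) :=
  let depd := PySem.Dict.mk dependencies
  -- open_sets[mod] = {mod}, then each dep added in turn
  let open_sets : PySem.Dict String (PySem.Set String) :=
    modules.foldl (fun d mod =>
      d.insert mod ((depd.getD mod []).foldl PySem.Set.add (PySem.Set.add PySem.Set.empty mod))) PySem.Dict.empty
  -- nerve = defaultdict(list); for mod in modules: nerve[0].append((mod,))
  let nerve0 : PySem.Dict Int (List (List String)) :=
    modules.foldl (fun d mod => d.modify 0 [] (fun l => l ++ [[mod]])) PySem.Dict.empty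
  -- for k in range(1, 6): for combo in combinations(modules, k+1): if intersection: nerve[k].append(combo)
  let nerve : PySem.Dict Int (List (List String)) :=
    (PySem.List.pyRange 1 6 1).foldl (fun d k =>
      (PySem.List.combinations modules (k + 1).toNat).foldl (fun d combo =>
        if pvInterA open_sets combo ≠ [] then d.modify k [] (fun l => l ++ [combo]) else d) d) nerve0
  (nerve.items, open_sets.items)

-- ===== PORT B =====
-- _rec(r, mods, inter, open_sets): extend the prefix by r modules, pruning empty intersections
def pvRec (S : PySem.Dict String (PySem.Set String)) (r : Nat) (ms : List String) (inter : PySem.Set String) : List (List String) :=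
  match r, ms with
  | 0, _ => [[]]
  | _ + 1, [] => []
  | r' + 1, m :: ms' =>
    (let i2 := PySem.Set.inter inter (S.getD m []);
     if i2 ≠ [] then (pvRec S r' ms' i2).map (fun t => m :: t) else [])
    ++ pvRec S (r' + 1) ms' inter

-- _top(size, mods, open_sets)
def pvTop (S : PySem.Dict String (PySem.Set String)) (size : Nat) (ms : List String) : List (List String) :=
  match ms with
  | [] => []
  | m :: ms' => (pvRec S (size - 1) ms' (S.getD m [])).map (fun t => m :: t) ++ pvTop S size ms'

def build_cech_nerve_alt (modules : List String) (dependencies : List (String × List String)) : (List (Int × List (List String))) × (List (String × List String)) :=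
  let depd := PySem.Dict.mk dependencies
  -- nb = {m}; nb.update(dependencies.get(m, []))
  let open_sets : PySem.Dict String (PySem.Set String) :=
    modules.foldl (fun d m =>
      d.insert m (PySem.Set.update (PySem.Set.add PySem.Set.empty m) (depd.getD m []))) PySem.Dict.empty
  -- nerve receives fresh increasing keys only, so its items list is built by appending pairs
  let nerve0 : List (Int × List (List String)) :=
    if modules.isEmpty then [] else [((0 : Int), modules.map (fun m => [m]))]
  let rest : List (Int × List (List String)) :=
    ([1, 2, 3, 4, 5] : List Int).flatMap (fun k =>
      let simps := pvTop open_sets (k + 1).toNat modules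
      if simps.isEmpty then [] else [(k, simps)])
  (nerve0 ++ rest, open_sets.items)

-- ===== PRECONDITION & SPEC =====
def Spec_build_cech_nerve (modules : List String) (dependencies : List (String × List String)) (out : (List (Int × List (List String))) × (List (String × List String))) : Prop := out = build_cech_nerve_alt modules dependencies
instance (modules : List String) (dependencies : List (String × List String)) (out : (List (Int × List (List String))) × (List (String × List String))) : Decidable (Spec_build_cech_nerve modules dependencies out) := by unfold Spec_build_cech_nerve; infer_instance

-- ===== CLAIM (what is proved, stated in full; the proofs are below) =====
def Claim_equal_build_cech_nerve : Prop := ∀ (modules : List String) (dependencies : List (String × List String)), Dom_build_cech_nerve modules dependencies → Spec_build_cech_nerve modules dependencies (build_cech_nerve modules dependencies)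

-- ===== LEMMAS AND PROOFS =====

-- `modify k` on a dict whose last entry is `(k, acc)` (k not earlier) rewrites that entry
theorem pv_modify_last {V : Type} (base : List (Int × List V)) (acc : List V) (k : Int)
    (hk : k ∉ base.map Prod.fst) (f : List V → List V) :
    PySem.Dict.modify (PySem.Dict.mk (base ++ [(k, acc)])) k [] f = PySem.Dict.mk (base ++ [(k, f acc)]) := by
  have hfind : ∀ p ∈ base, (p.1 == k) = false := by
    intro p hp
    exact beq_eq_false_iff_ne.mpr (fun h => hk (h ▸ List.mem_map_of_mem hp))
  have h1 : List.find? (fun p => p.1 == k) base = none := List.find?_eq_none.mpr (by intro p hp; simp [hfind p hp])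
  simp [PySem.Dict.modify, PySem.Dict.insert, PySem.Dict.getD, PySem.Dict.get?, PySem.Dict.contains,
    List.find?_append, h1, List.map_append]
  have : List.map (fun p => if p.1 = k then (k, f acc) else p) base = List.map id base :=
    List.map_congr_left (fun p hp => by simp [show p.1 ≠ k from by simpa using hfind p hp])
  simpa using this

-- `modify k` on a dict without key k appends a fresh entry
theorem pv_modify_fresh {V : Type} (base : List (Int × List V)) (k : Int)
    (hk : k ∉ base.map Prod.fst) (f : List V → List V) :
    PySem.Dict.modify (PySem.Dict.mk base) k [] f = PySem.Dict.mk (base ++ [(k, f [])]) := by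
  have hfind : ∀ p ∈ base, (p.1 == k) = false := by
    intro p hp
    exact beq_eq_false_iff_ne.mpr (fun h => hk (h ▸ List.mem_map_of_mem hp))
  have h1 : List.find? (fun p => p.1 == k) base = none := List.find?_eq_none.mpr (by intro p hp; simp [hfind p hp])
  have hcont : (PySem.Dict.mk base).contains k = false := by
    simp only [PySem.Dict.contains, List.any_eq_false]
    intro p hp; simp [hfind p hp]
  simp [PySem.Dict.modify, PySem.Dict.insert, PySem.Dict.getD, PySem.Dict.get?, hcont, h1]

-- conditional appending loop into key k sitting last
theorem pv_inner2 {α V : Type} (f : α → V) (P : α → Prop) [DecidablePred P] (k : Int) :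
    ∀ (cs : List α) (base : List (Int × List V)) (acc : List V), k ∉ base.map Prod.fst →
    (cs.foldl (fun d c => if P c then PySem.Dict.modify d k [] (fun l => l ++ [f c]) else d)
      (PySem.Dict.mk (base ++ [(k, acc)])))
      = PySem.Dict.mk (base ++ [(k, acc ++ (cs.filter (fun c => decide (P c))).map f)]) := by
  intro cs
  induction cs with
  | nil => intro base acc hk; simp
  | cons c cs ih =>
    intro base acc hk
    by_cases hp : P c
    · rw [List.foldl_cons, if_pos hp, pv_modify_last base acc k hk]
      rw [ih base _ hk]
      simp [hp]
    · rw [List.foldl_cons, if_neg hp, ih base acc hk]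
      simp [hp]

-- conditional appending loop into a fresh key k
theorem pv_inner {α V : Type} (f : α → V) (P : α → Prop) [DecidablePred P] (k : Int) (cs : List α)
    (base : List (Int × List V)) (hk : k ∉ base.map Prod.fst) :
    (cs.foldl (fun d c => if P c then PySem.Dict.modify d k [] (fun l => l ++ [f c]) else d) (PySem.Dict.mk base))
      = PySem.Dict.mk (base ++ (if (cs.filter (fun c => decide (P c))).isEmpty then []
          else [(k, (cs.filter (fun c => decide (P c))).map f)])) := by
  induction cs with
  | nil => simp
  | cons c cs ih =>
    by_cases hp : P c
    · rw [List.foldl_cons, if_pos hp, pv_modify_fresh base k hk, pv_inner2 f P k cs base _ hk]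
      simp [hp]
    · rw [List.foldl_cons, if_neg hp, ih]
      simp [hp]

-- the k-loop over fresh distinct keys appends one optional entry per key
theorem pv_outer {α : Type} (C : Int → List α) (P : α → Prop) [DecidablePred P] :
    ∀ (ks : List Int) (base : List (Int × List α)), ks.Nodup → (∀ k ∈ ks, k ∉ base.map Prod.fst) →
    (ks.foldl (fun d k => (C k).foldl (fun d c => if P c then PySem.Dict.modify d k [] (fun l => l ++ [c]) else d) d) (PySem.Dict.mk base))
      = PySem.Dict.mk (base ++ ks.flatMap (fun k => if ((C k).filter (fun c => decide (P c))).isEmpty then []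
          else [(k, (C k).filter (fun c => decide (P c)))])) := by
  intro ks
  induction ks with
  | nil => intro base _ _; simp
  | cons k ks ih =>
    intro base hnd hk
    have hstep := pv_inner (fun c => c) P k (C k) base (hk k (by simp))
    simp only [List.foldl_cons]
    rw [show (fun d c => if P c then PySem.Dict.modify d k [] (fun l => l ++ [c]) else d)
        = (fun d c => if P c then PySem.Dict.modify d k [] (fun l => l ++ [(fun c => c) c]) else d) from rfl,
      hstep]
    rw [ih _ (hnd.of_cons) ?_]
    · simp only [List.map_id', List.flatMap_cons, List.append_assoc]
    · intro k' hk'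
      have hne : k' ≠ k := by rintro rfl; exact (List.nodup_cons.mp hnd).1 hk'
      have := hk k' (by simp [hk'])
      split_ifs with h
      · simpa using this
      · simp [List.map_id']
        exact ⟨by simpa using this, hne⟩

-- the 0-simplex loop: append every module under the fresh key 0
theorem pv_nerve0 (f : String → List String) (modules : List String) :
    modules.foldl (fun d mod => PySem.Dict.modify d 0 [] (fun l => l ++ [f mod])) PySem.Dict.empty
      = PySem.Dict.mk (if modules.isEmpty then [] else [((0 : Int), modules.map f)]) := by
  have h := pv_inner f (fun _ => True) 0 modules [] (by simp)
  simpa using h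

-- the running intersection stays empty once empty
theorem pv_foldl_inter_nil (S : PySem.Dict String (PySem.Set String)) (c : List String) :
    c.foldl (fun a m => PySem.Set.inter a (S.getD m [])) [] = [] := by
  induction c with
  | nil => rfl
  | cons m c ih => simpa [PySem.Set.inter] using ih

-- B's pruned DFS = filtered combinations (running intersection nonempty)
theorem pv_rec_eq (S : PySem.Dict String (PySem.Set String)) :
    ∀ (ms : List String) (r : Nat) (inter : PySem.Set String), inter ≠ [] →
    pvRec S r ms inter = (PySem.List.combinations ms r).filter
      (fun c => decide (c.foldl (fun a m => PySem.Set.inter a (S.getD m [])) inter ≠ [])) := by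
  intro ms
  induction ms with
  | nil =>
    intro r inter hi
    cases r with
    | zero => simp [pvRec, PySem.List.combinations_zero, hi]
    | succ r => simp [pvRec, PySem.List.combinations_nil_succ]
  | cons m ms ih =>
    intro r inter hi
    cases r with
    | zero => simp [pvRec, PySem.List.combinations_zero, hi]
    | succ r =>
      rw [pvRec, PySem.List.combinations_cons_succ, List.filter_append, List.filter_map]
      congr 1
      · by_cases h2 : PySem.Set.inter inter (S.getD m []) = []
        · simp only [h2, ne_eq, not_true_eq_false, if_false]
          rw [List.filter_eq_nil_iff.mpr (by
            intro c _
            simp [Function.comp, List.foldl_cons, h2, pv_foldl_inter_nil S c])]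
          rfl
        · simp only [ne_eq, h2, not_false_eq_true, if_true, ih _ _ h2]
          rw [show ((fun c => decide (¬List.foldl (fun a m => PySem.Set.inter a (S.getD m [])) inter c = [])) ∘ (fun t => m :: t))
              = (fun c => decide (¬List.foldl (fun a m => PySem.Set.inter a (S.getD m [])) (PySem.Set.inter inter (S.getD m [])) c = [])) from by
            funext c; simp [Function.comp, List.foldl_cons]]
      · exact ih _ _ hi

theorem pv_top_eq (S : PySem.Dict String (PySem.Set String)) :
    ∀ (ms : List String) (sz : Nat), sz ≠ 0 → (∀ m ∈ ms, S.getD m [] ≠ []) →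
    pvTop S sz ms = (PySem.List.combinations ms sz).filter (fun c => decide (pvInterA S c ≠ [])) := by
  intro ms
  induction ms with
  | nil =>
    intro sz hsz _
    obtain ⟨r, rfl⟩ := Nat.exists_eq_succ_of_ne_zero hsz
    simp [pvTop, PySem.List.combinations_nil_succ]
  | cons m ms ih =>
    intro sz hsz hS
    obtain ⟨r, rfl⟩ := Nat.exists_eq_succ_of_ne_zero hsz
    rw [pvTop, PySem.List.combinations_cons_succ, List.filter_append, List.filter_map]
    congr 1
    · rw [pv_rec_eq S ms (r + 1 - 1) (S.getD m []) (hS m (by simp))]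
      congr 1
    · exact ih (r + 1) hsz (fun x hx => hS x (by simp [hx]))

-- lookups in the open-set dict: untouched keys are preserved …
theorem pv_getD_foldl_insert_not_mem (nb : String → PySem.Set String) :
    ∀ (l : List String) (d : PySem.Dict String (PySem.Set String)) (m : String), m ∉ l →
    (l.foldl (fun d x => d.insert x (nb x)) d).getD m [] = d.getD m [] := by
  intro l
  induction l with
  | nil => intro d m _; rfl
  | cons x l ih =>
    intro d m hm
    rw [List.foldl_cons, ih _ m (fun h => hm (by simp [h])),
      PySem.Dict.getD_insert_of_ne _ _ _ (by rintro rfl; exact hm (by simp))]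

-- … and every inserted key holds its (last) inserted value
theorem pv_getD_foldl_insert (nb : String → PySem.Set String) :
    ∀ (l : List String) (d : PySem.Dict String (PySem.Set String)) (m : String), m ∈ l →
    (l.foldl (fun d x => d.insert x (nb x)) d).getD m [] = nb m := by
  intro l
  induction l with
  | nil => intro d m hm; simp at hm
  | cons x l ih =>
    intro d m hm
    by_cases h : m ∈ l
    · rw [List.foldl_cons, ih _ m h]
    · have hx : m = x := by rcases List.mem_cons.mp hm with h' | h'; exact h'; exact absurd h' h
      subst hx
      rw [List.foldl_cons, pv_getD_foldl_insert_not_mem nb l _ m h, PySem.Dict.getD_insert_self]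

-- every module's open set contains the module itself, so it is nonempty
theorem pv_openSets_ne_nil (modules : List String) (depd : PySem.Dict String (List String)) :
    ∀ m ∈ modules,
      (modules.foldl (fun d m =>
        d.insert m (PySem.Set.update (PySem.Set.add PySem.Set.empty m) (depd.getD m []))) PySem.Dict.empty).getD m [] ≠ [] := by
  intro m hm
  rw [pv_getD_foldl_insert _ modules _ m hm]
  have : m ∈ PySem.Set.update (PySem.Set.add PySem.Set.empty m) (depd.getD m []) :=
    (PySem.Set.mem_update _ _ _).mpr (Or.inl ((PySem.Set.mem_add _ _ _).mpr (Or.inr rfl)))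
  exact List.ne_nil_of_mem this

-- ===== VERDICT (by name: the statement is the Claim_ definition above) =====
theorem build_cech_nerve_spec : Claim_equal_build_cech_nerve := by
  intro modules dependencies _
  unfold Spec_build_cech_nerve build_cech_nerve build_cech_nerve_alt
  dsimp only []
  have hSS : (modules.foldl (fun d mod =>
        d.insert mod (((PySem.Dict.mk dependencies).getD mod []).foldl PySem.Set.add (PySem.Set.add PySem.Set.empty mod))) PySem.Dict.empty)
      = (modules.foldl (fun d m =>
        d.insert m (PySem.Set.update (PySem.Set.add PySem.Set.empty m) ((PySem.Dict.mk dependencies).getD m []))) PySem.Dict.empty) := rfl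
  rw [hSS]
  set S := (modules.foldl (fun d m =>
        d.insert m (PySem.Set.update (PySem.Set.add PySem.Set.empty m) ((PySem.Dict.mk dependencies).getD m []))) PySem.Dict.empty) with hS
  have hne : ∀ m ∈ modules, S.getD m [] ≠ [] := pv_openSets_ne_nil modules (PySem.Dict.mk dependencies)
  have hrange : PySem.List.pyRange 1 6 1 = ([1, 2, 3, 4, 5] : List Int) := rfl
  rw [hrange, pv_nerve0 (fun m => [m]) modules,
    pv_outer (fun k => PySem.List.combinations modules (k + 1).toNat) (fun combo => pvInterA S combo ≠ [])
      [1, 2, 3, 4, 5] _ (by decide)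
      (by intro k hk
          have hk0 : k ≠ 0 := by fin_cases hk <;> decide
          split_ifs with h
          · simp
          · simp only [List.map_cons, List.map_nil, List.mem_singleton]
            exact hk0)]
  simp only [Prod.mk.injEq]
  refine ⟨?_, trivial⟩
  congr 1
  simp only [List.flatMap_cons, List.flatMap_nil, List.append_nil]
  have htop : ∀ (n : Nat), n ≠ 0 → pvTop S n modules
      = (PySem.List.combinations modules n).filter (fun c => decide (pvInterA S c ≠ [])) :=
    fun n hn => pv_top_eq S modules n hn hne
  rw [show ((1 : Int) + 1).toNat = 2 from rfl, show ((2 : Int) + 1).toNat = 3 from rfl,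
    show ((3 : Int) + 1).toNat = 4 from rfl, show ((4 : Int) + 1).toNat = 5 from rfl,
    show ((5 : Int) + 1).toNat = 6 from rfl,
    htop 2 (by decide), htop 3 (by decide), htop 4 (by decide), htop 5 (by decide), htop 6 (by decide)]
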